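-- pv_equiv track=rewrite | github.com/A-stick-bug/USACO | 2022_Jan_B2_non_transistive_dice.py | wins
-- ===== SOURCE A (Python) =====
-- def wins(d1, d2):
--     """check is dice 1 wins against dice 2 by trying all roll possibilities (they have equal chance)"""
--     w1 = 0
--     w2 = 0
--     for i in range(4):
--         for j in range(4):
--             if d1[i] > d2[j]:
--                 w1 += 1
--             elif d1[i] < d2[j]:
--                 w2 += 1
--     return w1 > w2
-- ===== SOURCE B (Python) =====
-- def wins(d1, d2):
--     """check is dice 1 wins against dice 2 by trying all roll possibilities (they have equal chance)"""
--     a = sorted([d1[0], d1[1], d1[2], d1[3]])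
--     b = sorted([d2[0], d2[1], d2[2], d2[3]])
--     w1 = 0
--     w2 = 0
--     lo = 0
--     hi = 0
--     for v in a:
--         while lo < len(b) and b[lo] < v:
--             lo += 1
--         while hi < len(b) and b[hi] <= v:
--             hi += 1
--         w1 += lo
--         w2 += len(b) - hi
--     return w1 > w2
-- ===== Notes on version B (the rewrite author's own statement) =====
-- stated objective: alternative
-- what changed: Replaces the 4x4 nested comparison loops by sorting copies of both dice and a single merge-style two-pointer scan: lo/hi advance monotonically over sorted d2 counting faces below (w1) and at-or-below (w2's complement) each sorted d1 face, so ties are skipped exactly as in A.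
import Mathlib
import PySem

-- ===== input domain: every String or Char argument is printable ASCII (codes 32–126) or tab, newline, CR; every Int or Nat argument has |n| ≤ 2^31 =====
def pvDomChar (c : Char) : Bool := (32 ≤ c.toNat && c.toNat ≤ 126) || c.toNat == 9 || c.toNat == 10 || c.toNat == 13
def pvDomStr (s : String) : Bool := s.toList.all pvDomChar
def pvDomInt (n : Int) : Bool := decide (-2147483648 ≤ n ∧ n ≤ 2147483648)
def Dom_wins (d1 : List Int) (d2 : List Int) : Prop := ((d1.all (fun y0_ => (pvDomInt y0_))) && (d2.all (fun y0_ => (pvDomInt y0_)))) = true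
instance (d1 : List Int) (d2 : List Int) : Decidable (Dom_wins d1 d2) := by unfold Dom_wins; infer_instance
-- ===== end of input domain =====

-- B replaces A's 4x4 nested comparison loops by sorting copies of both dice and one
-- merge-style two-pointer scan over the sorted lists (objective: alternative decomposition).

-- ===== PORT A =====
def wins (d1 : List Int) (d2 : List Int) : Bool :=
  -- w1 = 0; w2 = 0; for i in range(4): for j in range(4): compare d1[i] with d2[j]
  -- indexing is total here via pyGetD; Pre_wins guarantees every index is in range
  let st := (PySem.List.pyRange 0 4 1).foldl (fun (w : Int × Int) i =>
    (PySem.List.pyRange 0 4 1).foldl (fun (w : Int × Int) j =>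
      if PySem.List.pyGetD d1 i 0 > PySem.List.pyGetD d2 j 0 then (w.1 + 1, w.2)
      else if PySem.List.pyGetD d1 i 0 < PySem.List.pyGetD d2 j 0 then (w.1, w.2 + 1)
      else w) w) ((0 : Int), (0 : Int))
  st.1 > st.2

-- ===== PORT B =====
-- 'while lo < len(b) and b[lo] < v: lo += 1' (p instantiated with (· < v) resp. (· ≤ v))
def winsAdv (b : List Int) (p : Int → Bool) (lo : Nat) : Nat :=
  if h : lo < b.length then
    if p b[lo] then winsAdv b p (lo + 1) else lo
  else lo
termination_by b.length - lo

def wins_alt (d1 : List Int) (d2 : List Int) : Bool :=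
  -- a = sorted([d1[0], d1[1], d1[2], d1[3]]); indexing total via pyGetD, in range under Pre_wins
  let a := PySem.List.sorted [PySem.List.pyGetD d1 0 0, PySem.List.pyGetD d1 1 0,
    PySem.List.pyGetD d1 2 0, PySem.List.pyGetD d1 3 0] (fun x => x) false
  let b := PySem.List.sorted [PySem.List.pyGetD d2 0 0, PySem.List.pyGetD d2 1 0,
    PySem.List.pyGetD d2 2 0, PySem.List.pyGetD d2 3 0] (fun x => x) false
  let st := a.foldl (fun (s : Int × Int × Nat × Nat) v =>
    let lo := winsAdv b (fun y => decide (y < v)) s.2.2.1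
    let hi := winsAdv b (fun y => decide (y ≤ v)) s.2.2.2
    (s.1 + (lo : Int), s.2.1 + ((b.length : Int) - (hi : Int)), lo, hi))
    ((0 : Int), (0 : Int), (0 : Nat), (0 : Nat))
  st.1 > st.2.1

-- ===== PRECONDITION & SPEC =====
-- Pre_wins: both dice need at least 4 faces — A indexes d1[0..3] and d2[0..3] and raises
-- IndexError otherwise; extra faces beyond the first four are ignored by both programs.
def Pre_wins (d1 : List Int) (d2 : List Int) : Prop := 4 ≤ d1.length ∧ 4 ≤ d2.length
instance (d1 : List Int) (d2 : List Int) : Decidable (Pre_wins d1 d2) := by unfold Pre_wins; infer_instance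
def pvWitness_wins : List Int × List Int := ([1, 2, 3, 4], [0, 2, 2, 5])

def Spec_wins (d1 : List Int) (d2 : List Int) (out : Bool) : Prop := out = wins_alt d1 d2
instance (d1 : List Int) (d2 : List Int) (out : Bool) : Decidable (Spec_wins d1 d2 out) := by unfold Spec_wins; infer_instance

-- ===== CLAIM (what is proved, stated in full; the proofs are below) =====
def Claim_equal_wins : Prop := ∀ (d1 : List Int) (d2 : List Int), Dom_wins d1 d2 → Pre_wins d1 d2 → Spec_wins d1 d2 (wins d1 d2)

-- ===== LEMMAS AND PROOFS =====

-- On a sorted list with a downward-closed predicate p, position i is below the p-count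
-- exactly when p holds at i.
theorem idx_lt_countP (b : List Int) (p : Int → Bool)
    (hb : b.Pairwise (fun x y => x ≤ y)) (hp : ∀ x y : Int, x ≤ y → p y = true → p x = true) :
    ∀ i (h : i < b.length), (i < b.countP p ↔ p b[i] = true) := by
  induction b with
  | nil => intro i h; simp at h
  | cons c t ih =>
    rw [List.pairwise_cons] at hb
    intro i h
    rcases hb with ⟨hc, ht⟩
    by_cases hpc : p c = true
    · cases i with
      | zero => simp [hpc]
      | succ j =>
        have hj : j < t.length := by simpa using h
        have := ih ht j hj
        simpa [hpc] using this
    · have hz : t.countP p = 0 := by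
        rw [List.countP_eq_zero]
        intro y hy hpy
        exact hpc (hp c y (hc y hy) hpy)
      cases i with
      | zero => simp [hpc, hz]
      | succ j =>
        have hj : j < t.length := by simpa using h
        have : p t[j] = false := by
          by_contra hcontra
          have : p t[j] = true := by simpa using hcontra
          exact hpc (hp c t[j] (hc _ (List.getElem_mem hj)) this)
        simp [hpc, hz, this]

-- The while-loop advances the pointer exactly to the p-count of the sorted list.
theorem winsAdv_eq (b : List Int) (p : Int → Bool)
    (hb : b.Pairwise (fun x y => x ≤ y)) (hp : ∀ x y : Int, x ≤ y → p y = true → p x = true) :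
    ∀ lo, lo ≤ b.countP p → winsAdv b p lo = b.countP p := by
  have H : ∀ n lo, b.length - lo ≤ n → lo ≤ b.countP p → winsAdv b p lo = b.countP p := by
    intro n
    induction n with
    | zero =>
      intro lo hn hlo
      have hcle := @List.countP_le_length _ p b
      rw [winsAdv]
      have : ¬ lo < b.length := by omega
      simp [this]
      omega
    | succ n ih =>
      intro lo hn hlo
      rw [winsAdv]
      by_cases h : lo < b.length
      · simp [h]
        by_cases hpb : p b[lo] = true
        · simp [hpb]
          apply ih
          · omega
          · have := (idx_lt_countP b p hb hp lo h).mpr hpb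
            omega
        · simp [hpb]
          by_contra hne
          have hlt : lo < b.countP p := by omega
          have := (idx_lt_countP b p hb hp lo h).mp hlt
          simp [hpb] at this
      · simp [h]
        have := @List.countP_le_length _ p b
        omega
  intro lo hlo
  exact H b.length lo (by omega) hlo

-- A's inner loop over a value list counts strictly-smaller and strictly-larger faces.
theorem innerA (x : Int) (l2 : List Int) : ∀ w : Int × Int,
    l2.foldl (fun w y => if x > y then (w.1 + 1, w.2) else if x < y then (w.1, w.2 + 1) else w) w
    = (w.1 + (l2.countP (fun y => decide (y < x)) : Int),
       w.2 + (l2.countP (fun y => decide (x < y)) : Int)) := by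
  induction l2 with
  | nil => intro w; simp
  | cons y t ih =>
    intro w
    rw [List.foldl_cons, ih]
    rcases lt_trichotomy x y with h | h | h
    · simp [show ¬ x > y by omega, h]
      omega
    · simp [show ¬ x > y by omega, show ¬ x < y by omega, h]
    · simp [h, show ¬ x < y by omega]
      omega

-- A's double loop, on lists with their first four faces exposed, is the comparison of the
-- two pairwise-count sums.
theorem winsA_eq (x0 x1 x2 x3 : Int) (r1 : List Int) (y0 y1 y2 y3 : Int) (r2 : List Int) :
    wins (x0::x1::x2::x3::r1) (y0::y1::y2::y3::r2) =
    decide ((([x0,x1,x2,x3].map (fun v => (([y0,y1,y2,y3].countP (fun y => decide (y < v))) : Int))).sum)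
          > (([x0,x1,x2,x3].map (fun v => (([y0,y1,y2,y3].countP (fun y => decide (v < y))) : Int))).sum)) := by
  have hr : PySem.List.pyRange 0 4 1 = [0, 1, 2, 3] := by decide
  have e0 : PySem.List.pyGetD (y0::y1::y2::y3::r2) (0:Int) 0 = y0 := by simp [pysem]
  have e1 : PySem.List.pyGetD (y0::y1::y2::y3::r2) (1:Int) 0 = y1 := by simp [pysem]
  have e2 : PySem.List.pyGetD (y0::y1::y2::y3::r2) (2:Int) 0 = y2 := by simp [pysem]
  have e3 : PySem.List.pyGetD (y0::y1::y2::y3::r2) (3:Int) 0 = y3 := by simp [pysem]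
  have f0 : PySem.List.pyGetD (x0::x1::x2::x3::r1) (0:Int) 0 = x0 := by simp [pysem]
  have f1 : PySem.List.pyGetD (x0::x1::x2::x3::r1) (1:Int) 0 = x1 := by simp [pysem]
  have f2 : PySem.List.pyGetD (x0::x1::x2::x3::r1) (2:Int) 0 = x2 := by simp [pysem]
  have f3 : PySem.List.pyGetD (x0::x1::x2::x3::r1) (3:Int) 0 = x3 := by simp [pysem]
  have key : ∀ (x : Int) (w : Int × Int),
      List.foldl (fun (w : Int × Int) j =>
        if x > PySem.List.pyGetD (y0::y1::y2::y3::r2) j 0 then (w.1 + 1, w.2)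
        else if x < PySem.List.pyGetD (y0::y1::y2::y3::r2) j 0 then (w.1, w.2 + 1)
        else w) w ([0,1,2,3] : List Int)
      = (w.1 + ([y0,y1,y2,y3].countP (fun y => decide (y < x)) : Int),
         w.2 + ([y0,y1,y2,y3].countP (fun y => decide (x < y)) : Int)) := by
    intro x w
    simp only [List.foldl_cons, List.foldl_nil]
    rw [e0, e1, e2, e3]
    rw [← innerA x [y0, y1, y2, y3] w]
    simp only [List.foldl_cons, List.foldl_nil]
  simp only [wins, hr]
  rw [List.foldl_cons, List.foldl_cons, List.foldl_cons, List.foldl_cons, List.foldl_nil]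
  rw [key, key, key, key, f0, f1, f2, f3]
  simp only [List.map_cons, List.map_nil, List.sum_cons, List.sum_nil]
  rw [decide_eq_decide]
  omega

-- length minus the at-most count is the strictly-greater count
theorem cnt_compl (l : List Int) (v : Int) :
    (l.length : Int) - (l.countP (fun y => decide (y ≤ v)) : Int)
      = (l.countP (fun y => decide (v < y)) : Int) := by
  induction l with
  | nil => simp
  | cons y t ih =>
    by_cases h : y ≤ v
    · simp [List.countP_cons, h, show ¬ v < y by omega]
      omega
    · simp [List.countP_cons, h, show v < y by omega]
      omega

-- B's fold over the sorted d1: the two pointers always land on the counts, and the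
-- accumulators collect their sums.
theorem foldB (b : List Int) (hsb : b.Pairwise (fun x y => x ≤ y)) :
    ∀ (a : List Int), a.Pairwise (fun x y => x ≤ y) →
    ∀ (w1 w2 : Int) (lo hi : Nat),
      (∀ v ∈ a, lo ≤ b.countP (fun y => decide (y < v)) ∧ hi ≤ b.countP (fun y => decide (y ≤ v))) →
      (a.foldl (fun (s : Int × Int × Nat × Nat) v =>
        (s.1 + (winsAdv b (fun y => decide (y < v)) s.2.2.1 : Int),
         s.2.1 + ((b.length : Int) - (winsAdv b (fun y => decide (y ≤ v)) s.2.2.2 : Int)),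
         winsAdv b (fun y => decide (y < v)) s.2.2.1,
         winsAdv b (fun y => decide (y ≤ v)) s.2.2.2)) (w1, w2, lo, hi)).1
        = w1 + (a.map (fun v => (b.countP (fun y => decide (y < v)) : Int))).sum ∧
      (a.foldl (fun (s : Int × Int × Nat × Nat) v =>
        (s.1 + (winsAdv b (fun y => decide (y < v)) s.2.2.1 : Int),
         s.2.1 + ((b.length : Int) - (winsAdv b (fun y => decide (y ≤ v)) s.2.2.2 : Int)),
         winsAdv b (fun y => decide (y < v)) s.2.2.1,
         winsAdv b (fun y => decide (y ≤ v)) s.2.2.2)) (w1, w2, lo, hi)).2.1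
        = w2 + (a.map (fun v => ((b.length : Int) - (b.countP (fun y => decide (y ≤ v)) : Int)))).sum := by
  intro a
  induction a with
  | nil => intro _ w1 w2 lo hi _; simp
  | cons v t ih =>
    intro hpa w1 w2 lo hi hbound
    rw [List.pairwise_cons] at hpa
    obtain ⟨hvle, hpt⟩ := hpa
    have hlo : winsAdv b (fun y => decide (y < v)) lo = b.countP (fun y => decide (y < v)) := by
      apply winsAdv_eq b _ hsb
      · intro x y hxy hpy; simp at hpy ⊢; omega
      · exact (hbound v (by simp)).1
    have hhi : winsAdv b (fun y => decide (y ≤ v)) hi = b.countP (fun y => decide (y ≤ v)) := by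
      apply winsAdv_eq b _ hsb
      · intro x y hxy hpy; simp at hpy ⊢; omega
      · exact (hbound v (by simp)).2
    have hnext : ∀ v' ∈ t,
        b.countP (fun y => decide (y < v)) ≤ b.countP (fun y => decide (y < v')) ∧
        b.countP (fun y => decide (y ≤ v)) ≤ b.countP (fun y => decide (y ≤ v')) := by
      intro v' hv'
      have hvv : v ≤ v' := hvle v' hv'
      constructor
      · apply List.countP_mono_left
        intro y _ hy; simp at hy ⊢; omega
      · apply List.countP_mono_left
        intro y _ hy; simp at hy ⊢; omega
    have := ih hpt (w1 + (b.countP (fun y => decide (y < v)) : Int))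
      (w2 + ((b.length : Int) - (b.countP (fun y => decide (y ≤ v)) : Int)))
      (b.countP (fun y => decide (y < v))) (b.countP (fun y => decide (y ≤ v))) hnext
    obtain ⟨i1, i2⟩ := this
    constructor
    · rw [List.foldl_cons]
      simp only [hlo, hhi]
      rw [i1]
      simp only [List.map_cons, List.sum_cons]
      ring
    · rw [List.foldl_cons]
      simp only [hlo, hhi]
      rw [i2]
      simp only [List.map_cons, List.sum_cons]
      ring

-- B's computation for arbitrary face lists: sorting drops out, leaving the two count sums.
theorem winsB_core (X Y : List Int) :
    decide ((((PySem.List.sorted X (fun x => x) false).foldl (fun (s : Int × Int × Nat × Nat) v =>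
        (s.1 + (winsAdv (PySem.List.sorted Y (fun x => x) false) (fun y => decide (y < v)) s.2.2.1 : Int),
         s.2.1 + (((PySem.List.sorted Y (fun x => x) false).length : Int) - (winsAdv (PySem.List.sorted Y (fun x => x) false) (fun y => decide (y ≤ v)) s.2.2.2 : Int)),
         winsAdv (PySem.List.sorted Y (fun x => x) false) (fun y => decide (y < v)) s.2.2.1,
         winsAdv (PySem.List.sorted Y (fun x => x) false) (fun y => decide (y ≤ v)) s.2.2.2))
        ((0:Int), (0:Int), (0:Nat), (0:Nat))).1 : Int) > (((PySem.List.sorted X (fun x => x) false).foldl (fun (s : Int × Int × Nat × Nat) v =>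
        (s.1 + (winsAdv (PySem.List.sorted Y (fun x => x) false) (fun y => decide (y < v)) s.2.2.1 : Int),
         s.2.1 + (((PySem.List.sorted Y (fun x => x) false).length : Int) - (winsAdv (PySem.List.sorted Y (fun x => x) false) (fun y => decide (y ≤ v)) s.2.2.2 : Int)),
         winsAdv (PySem.List.sorted Y (fun x => x) false) (fun y => decide (y < v)) s.2.2.1,
         winsAdv (PySem.List.sorted Y (fun x => x) false) (fun y => decide (y ≤ v)) s.2.2.2))
        ((0:Int), (0:Int), (0:Nat), (0:Nat))).2.1 : Int))
    = decide ((X.map (fun v => (Y.countP (fun y => decide (y < v)) : Int))).sum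
            > (X.map (fun v => (Y.countP (fun y => decide (v < y)) : Int))).sum) := by
  have hsb := PySem.List.sorted_pairwise Y (fun x => x)
  have hsa := PySem.List.sorted_pairwise X (fun x => x)
  obtain ⟨h1, h2⟩ := foldB (PySem.List.sorted Y (fun x => x) false) hsb
    (PySem.List.sorted X (fun x => x) false) hsa 0 0 0 0
    (fun v _ => ⟨Nat.zero_le _, Nat.zero_le _⟩)
  rw [h1, h2, decide_eq_decide]
  have hcnt : ∀ p : Int → Bool,
      (PySem.List.sorted Y (fun x => x) false).countP p = Y.countP p :=
    fun p => (PySem.List.sorted_perm Y (fun x => x) false).countP_eq p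
  have hlenb : (PySem.List.sorted Y (fun x => x) false).length = Y.length :=
    PySem.List.length_sorted Y (fun x => x) false
  have hm1 : (PySem.List.sorted X (fun x => x) false).map
        (fun v => ((PySem.List.sorted Y (fun x => x) false).countP (fun y => decide (y < v)) : Int))
      = (PySem.List.sorted X (fun x => x) false).map
        (fun v => (Y.countP (fun y => decide (y < v)) : Int)) := by
    apply List.map_congr_left
    intro v _
    rw [hcnt]
  have hm2 : (PySem.List.sorted X (fun x => x) false).map
        (fun v => (((PySem.List.sorted Y (fun x => x) false).length : Int)
          - ((PySem.List.sorted Y (fun x => x) false).countP (fun y => decide (y ≤ v)) : Int)))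
      = (PySem.List.sorted X (fun x => x) false).map
        (fun v => (Y.countP (fun y => decide (v < y)) : Int)) := by
    apply List.map_congr_left
    intro v _
    rw [hcnt, hlenb]
    exact cnt_compl Y v
  rw [hm1, hm2]
  have hp1 : ((PySem.List.sorted X (fun x => x) false).map
      (fun v => (Y.countP (fun y => decide (y < v)) : Int))).sum
      = (X.map (fun v => (Y.countP (fun y => decide (y < v)) : Int))).sum :=
    ((PySem.List.sorted_perm X (fun x => x) false).map _).sum_eq
  have hp2 : ((PySem.List.sorted X (fun x => x) false).map
      (fun v => (Y.countP (fun y => decide (v < y)) : Int))).sum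
      = (X.map (fun v => (Y.countP (fun y => decide (v < y)) : Int))).sum :=
    ((PySem.List.sorted_perm X (fun x => x) false).map _).sum_eq
  rw [hp1, hp2]
  omega

theorem quad4 (a b c d : Int) (r : List Int) :
    [PySem.List.pyGetD (a::b::c::d::r) 0 0, PySem.List.pyGetD (a::b::c::d::r) 1 0,
     PySem.List.pyGetD (a::b::c::d::r) 2 0, PySem.List.pyGetD (a::b::c::d::r) 3 0] = [a, b, c, d] := by
  simp [pysem]

-- B, on lists with their first four faces exposed, computes the same two count sums.
theorem winsB_eq (x0 x1 x2 x3 : Int) (r1 : List Int) (y0 y1 y2 y3 : Int) (r2 : List Int) :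
    wins_alt (x0::x1::x2::x3::r1) (y0::y1::y2::y3::r2) =
    decide ((([x0,x1,x2,x3].map (fun v => (([y0,y1,y2,y3].countP (fun y => decide (y < v))) : Int))).sum)
          > (([x0,x1,x2,x3].map (fun v => (([y0,y1,y2,y3].countP (fun y => decide (v < y))) : Int))).sum)) := by
  have hsl1 := quad4 x0 x1 x2 x3 r1
  have hsl2 := quad4 y0 y1 y2 y3 r2
  have h := winsB_core [x0,x1,x2,x3] [y0,y1,y2,y3]
  calc wins_alt (x0::x1::x2::x3::r1) (y0::y1::y2::y3::r2)
      = decide ((((PySem.List.sorted [x0,x1,x2,x3] (fun x => x) false).foldl (fun (s : Int × Int × Nat × Nat) v =>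
          (s.1 + (winsAdv (PySem.List.sorted [y0,y1,y2,y3] (fun x => x) false) (fun y => decide (y < v)) s.2.2.1 : Int),
           s.2.1 + (((PySem.List.sorted [y0,y1,y2,y3] (fun x => x) false).length : Int) - (winsAdv (PySem.List.sorted [y0,y1,y2,y3] (fun x => x) false) (fun y => decide (y ≤ v)) s.2.2.2 : Int)),
           winsAdv (PySem.List.sorted [y0,y1,y2,y3] (fun x => x) false) (fun y => decide (y < v)) s.2.2.1,
           winsAdv (PySem.List.sorted [y0,y1,y2,y3] (fun x => x) false) (fun y => decide (y ≤ v)) s.2.2.2))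
          ((0:Int), (0:Int), (0:Nat), (0:Nat))).1 : Int) > (((PySem.List.sorted [x0,x1,x2,x3] (fun x => x) false).foldl (fun (s : Int × Int × Nat × Nat) v =>
          (s.1 + (winsAdv (PySem.List.sorted [y0,y1,y2,y3] (fun x => x) false) (fun y => decide (y < v)) s.2.2.1 : Int),
           s.2.1 + (((PySem.List.sorted [y0,y1,y2,y3] (fun x => x) false).length : Int) - (winsAdv (PySem.List.sorted [y0,y1,y2,y3] (fun x => x) false) (fun y => decide (y ≤ v)) s.2.2.2 : Int)),
           winsAdv (PySem.List.sorted [y0,y1,y2,y3] (fun x => x) false) (fun y => decide (y < v)) s.2.2.1,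
           winsAdv (PySem.List.sorted [y0,y1,y2,y3] (fun x => x) false) (fun y => decide (y ≤ v)) s.2.2.2))
          ((0:Int), (0:Int), (0:Nat), (0:Nat))).2.1 : Int)) := by
        unfold wins_alt
        rw [hsl1, hsl2]
    _ = _ := h

-- ===== VERDICT (by name: the statement is the Claim_ definition above) =====
theorem wins_spec : Claim_equal_wins := by
  intro d1 d2 _ hpre
  obtain ⟨h1, h2⟩ := hpre
  unfold Spec_wins
  rcases d1 with _ | ⟨x0, d1⟩; · simp at h1
  rcases d1 with _ | ⟨x1, d1⟩; · simp at h1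
  rcases d1 with _ | ⟨x2, d1⟩; · simp at h1
  rcases d1 with _ | ⟨x3, r1⟩; · simp at h1
  rcases d2 with _ | ⟨y0, d2⟩; · simp at h2
  rcases d2 with _ | ⟨y1, d2⟩; · simp at h2
  rcases d2 with _ | ⟨y2, d2⟩; · simp at h2
  rcases d2 with _ | ⟨y3, r2⟩; · simp at h2
  rw [winsA_eq, winsB_eq]
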